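-- pv_equiv track=rewrite | github.com/TonbiLX/TonbilAiFirewallv5 | backend/app/api/v1/vpn.py | _next_peer_ip
-- ===== SOURCE A (Python) =====
-- VPN_SUBNET = "10.13.13"
--
-- def _next_peer_ip(existing_ips: list[str]) -> str:
--     """Sonraki bos peer IP adresini bul."""
--     used = set()
--     for ip in existing_ips:
--         parts = ip.split("/")[0].split(".")
--         if len(parts) == 4:
--             used.add(int(parts[3]))
--
--     for i in range(2, 255):
--         if i not in used:
--             return f"{VPN_SUBNET}.{i}/32"
--     raise ValueError("Bos peer IP yok")
-- ===== SOURCE B (Python) =====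
-- VPN_SUBNET = "10.13.13"
--
--
-- def _octet(ip):
--     parts = ip.split("/")[0].split(".")
--     return int(parts[3]) if len(parts) == 4 else None
--
--
-- def _next_peer_ip(existing_ips: list) -> str:
--     """Sonraki bos peer IP adresini bul."""
--     octets = [o for o in map(_octet, existing_ips) if o is not None]
--     cand = 2
--     for o in sorted(set(octets)):
--         if o < 2:
--             continue
--         if o == cand:
--             cand += 1
--         elif o > cand:
--             break
--     if cand <= 254:
--         return f"{VPN_SUBNET}.{cand}/32"
--     raise ValueError("Bos peer IP yok")
-- ===== Notes on version B (the rewrite author's own statement) =====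
-- stated objective: alternative
-- what changed: B collects the used last-octets into a sorted deduplicated list and walks it once with a candidate counter starting at 2 (a gap in the sorted sequence is the answer), instead of A's membership scan of every candidate 2..254 against a hash set; Pre_ only excludes the inputs on which A raises (a 4-dot address with a non-integer last part, or a fully used subnet), where B raises the same ValueError.
import Mathlib
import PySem

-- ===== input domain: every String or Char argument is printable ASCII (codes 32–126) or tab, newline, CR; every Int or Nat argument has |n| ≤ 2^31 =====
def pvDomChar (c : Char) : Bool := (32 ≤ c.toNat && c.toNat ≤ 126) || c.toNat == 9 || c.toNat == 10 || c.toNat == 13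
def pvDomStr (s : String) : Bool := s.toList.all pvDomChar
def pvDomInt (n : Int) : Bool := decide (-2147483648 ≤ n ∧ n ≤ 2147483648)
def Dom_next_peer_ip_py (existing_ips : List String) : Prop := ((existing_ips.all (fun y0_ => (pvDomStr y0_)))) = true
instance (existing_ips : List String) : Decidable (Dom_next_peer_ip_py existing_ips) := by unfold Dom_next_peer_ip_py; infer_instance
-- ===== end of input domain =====

-- B replaces A's 2..254 membership scan against a set by one walk over the sorted deduplicated
-- used octets with a candidate counter (objective: alternative algorithm, same result).

-- ===== PORT A =====
-- step of A's 'for ip in existing_ips' loop building the set 'used'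
def pvStepA (u : PySem.Set Int) (ip : String) : PySem.Set Int :=
  let parts := (PySem.Str.split? (((PySem.Str.split? ip "/").getD []).headD "") ".").getD []
  if parts.length = 4 then
    match PySem.Int.ofStr? (parts.getD 3 "") with
    | some n => PySem.Set.add u n
    | none => u        -- Python: int() raises ValueError here; excluded by Pre_
  else u

def next_peer_ip_py (existing_ips : List String) : String :=
  let used : PySem.Set Int := existing_ips.foldl pvStepA PySem.Set.empty
  match (PySem.List.pyRange 2 255 1).find? (fun i => !(PySem.Set.contains used i)) with
  | some i => "10.13.13." ++ PySem.Int.toStr i ++ "/32"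
  | none => ""         -- Python: raise ValueError("Bos peer IP yok"); excluded by Pre_

-- ===== PORT B =====
-- B's helper _octet ('none' also stands for the int() ValueError case, which Pre_ excludes)
def pvOctet (ip : String) : Option Int :=
  let parts := (PySem.Str.split? (((PySem.Str.split? ip "/").getD []).headD "") ".").getD []
  if parts.length = 4 then PySem.Int.ofStr? (parts.getD 3 "") else none

-- B's 'for o in sorted(set(octets))' loop over the candidate counter, with break
def pvWalk : List Int → Int → Int
  | [], c => c
  | o :: rest, c =>
    if o < 2 then pvWalk rest c
    else if o = c then pvWalk rest (c + 1)
    else if c < o then c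
    else pvWalk rest c

def next_peer_ip_py_alt (existing_ips : List String) : String :=
  let octets : List Int := existing_ips.filterMap pvOctet
  let c := pvWalk (PySem.List.sorted (PySem.Set.ofList octets) (fun x => x) false) 2
  if c ≤ 254 then "10.13.13." ++ PySem.Int.toStr c ++ "/32"
  else ""              -- Python: raise ValueError("Bos peer IP yok"); excluded by Pre_

-- ===== PRECONDITION & SPEC =====
-- Pre_ excludes exactly the inputs on which A raises ValueError: a 4-dot address whose last
-- part is not an int literal, and the case where every octet 2..254 is already used
-- (B raises the same ValueError in both cases).
def Pre_next_peer_ip_py (existing_ips : List String) : Prop :=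
  (∀ ip ∈ existing_ips,
      ((PySem.Str.split? (((PySem.Str.split? ip "/").getD []).headD "") ".").getD []).length = 4 →
      (PySem.Int.ofStr?
        (((PySem.Str.split? (((PySem.Str.split? ip "/").getD []).headD "") ".").getD []).getD 3 "")).isSome = true)
  ∧ (∃ i ∈ PySem.List.pyRange 2 255 1, ∀ ip ∈ existing_ips, pvOctet ip ≠ some i)

instance (existing_ips : List String) : Decidable (Pre_next_peer_ip_py existing_ips) := by
  unfold Pre_next_peer_ip_py; infer_instance

def pvWitness_next_peer_ip_py : List String := ["10.13.13.2/32", "10.13.13.4/32"]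

def Spec_next_peer_ip_py (existing_ips : List String) (out : String) : Prop := out = next_peer_ip_py_alt existing_ips
instance (existing_ips : List String) (out : String) : Decidable (Spec_next_peer_ip_py existing_ips out) := by unfold Spec_next_peer_ip_py; infer_instance

-- ===== CLAIM (what is proved, stated in full; the proofs are below) =====
def Claim_equal_next_peer_ip_py : Prop := ∀ (existing_ips : List String), Dom_next_peer_ip_py existing_ips → Pre_next_peer_ip_py existing_ips → Spec_next_peer_ip_py existing_ips (next_peer_ip_py existing_ips)

-- ===== LEMMAS AND PROOFS =====

-- A's loop step, expressed through B's helper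
theorem pvStepA_eq (u : PySem.Set Int) (ip : String) :
    pvStepA u ip = (match pvOctet ip with
      | some n => PySem.Set.add u n
      | none => u) := by
  unfold pvStepA pvOctet
  by_cases h : ((PySem.Str.split? (((PySem.Str.split? ip "/").getD []).headD "") ".").getD []).length = 4
  · simp only [h, if_true]
  · simp only [h, if_false]

-- A's set-building loop is set(octets)
theorem pvFoldA_eq (l : List String) : ∀ (u : PySem.Set Int),
    l.foldl pvStepA u = PySem.Set.update u (l.filterMap pvOctet) := by
  induction l with
  | nil => intro u; rfl
  | cons ip t ih =>
    intro u
    simp only [List.foldl_cons, List.filterMap_cons]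
    rw [pvStepA_eq]
    cases h : pvOctet ip with
    | none => simpa using ih u
    | some n =>
      simp only []
      rw [ih, PySem.Set.update_cons]

-- the walk returns the first candidate ≥ its start (≥ 2) not in the (sorted, distinct) list
theorem pvWalk_spec (l : List Int) : ∀ (c : Int), 2 ≤ c → l.Pairwise (· < ·) →
    c ≤ pvWalk l c ∧ pvWalk l c ∉ l ∧ (∀ k, c ≤ k → k < pvWalk l c → k ∈ l) := by
  induction l with
  | nil =>
    intro c hc _
    refine ⟨le_refl c, by simp [pvWalk], ?_⟩
    intro k h1 h2
    simp [pvWalk] at h2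
    omega
  | cons o rest ih =>
    intro c hc hp
    have hp' : rest.Pairwise (· < ·) := (List.pairwise_cons.mp hp).2
    have ho : ∀ x ∈ rest, o < x := (List.pairwise_cons.mp hp).1
    by_cases h1 : o < 2
    · have H := ih c hc hp'
      have hge := H.1
      simp only [pvWalk, if_pos h1]
      refine ⟨H.1, ?_, ?_⟩
      · rw [List.mem_cons]
        push Not
        exact ⟨by omega, H.2.1⟩
      · intro k hk1 hk2
        exact List.mem_cons_of_mem _ (H.2.2 k hk1 hk2)
    · by_cases h2 : o = c
      · have H := ih (c + 1) (by omega) hp'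
        have hge := H.1
        simp only [pvWalk, if_neg h1, if_pos h2]
        refine ⟨by omega, ?_, ?_⟩
        · rw [List.mem_cons]
          push Not
          exact ⟨by omega, H.2.1⟩
        · intro k hk1 hk2
          by_cases hk : k = c
          · subst hk; subst h2; exact List.mem_cons_self
          · exact List.mem_cons_of_mem _ (H.2.2 k (by omega) hk2)
      · by_cases h3 : c < o
        · simp only [pvWalk, if_neg h1, if_neg h2, if_pos h3]
          refine ⟨le_refl c, ?_, ?_⟩
          · rw [List.mem_cons]
            push Not
            refine ⟨by omega, ?_⟩
            intro hm
            have := ho c hm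
            omega
          · intro k hk1 hk2
            omega
        · have H := ih c hc hp'
          have hge := H.1
          simp only [pvWalk, if_neg h1, if_neg h2, if_neg h3]
          refine ⟨H.1, ?_, ?_⟩
          · rw [List.mem_cons]
            push Not
            exact ⟨by omega, H.2.1⟩
          · intro k hk1 hk2
            exact List.mem_cons_of_mem _ (H.2.2 k hk1 hk2)

-- find? over range(a, b) returns the least satisfying element
theorem pvFind_pyRange (p : Int → Bool) (b r : Int) (hr : p r = true) (hrb : r < b) :
    ∀ (n : Nat) (a : Int), (r - a).toNat = n → a ≤ r →
    (∀ k, a ≤ k → k < r → p k = false) → (PySem.List.pyRange a b 1).find? p = some r := by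
  intro n
  induction n with
  | zero =>
    intro a h0 ha hmin
    have : a = r := by omega
    subst this
    rw [PySem.List.pyRange_one_cons (by omega)]
    simp [hr]
  | succ n ih =>
    intro a h0 ha hmin
    have hab : a < b := by omega
    rw [PySem.List.pyRange_one_cons hab]
    have hpa : p a = false := hmin a (le_refl a) (by omega)
    rw [List.find?_cons, hpa]
    exact ih (a + 1) (by omega) (by omega) (fun k hk1 hk2 => hmin k (by omega) hk2)

-- ===== VERDICT (by name: the statement is the Claim_ definition above) =====
theorem next_peer_ip_py_spec : Claim_equal_next_peer_ip_py := by
  unfold Claim_equal_next_peer_ip_py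
  intro xs _ hpre
  unfold Spec_next_peer_ip_py
  obtain ⟨hparse, i, hi_mem, hi_free⟩ := hpre
  have hmemS : ∀ x : Int,
      x ∈ PySem.List.sorted (PySem.Set.ofList (xs.filterMap pvOctet)) (fun x => x) false ↔
      x ∈ xs.filterMap pvOctet := by
    intro x
    rw [PySem.List.mem_sorted, PySem.Set.mem_ofList]
  have hpair : (PySem.List.sorted (PySem.Set.ofList (xs.filterMap pvOctet)) (fun x => x) false).Pairwise (· < ·) :=
    PySem.List.sorted_ofList_pairwise_lt _
  obtain ⟨hr2, hrnot, hrmin⟩ :=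
    pvWalk_spec (PySem.List.sorted (PySem.Set.ofList (xs.filterMap pvOctet)) (fun x => x) false) 2
      (le_refl 2) hpair
  set r := pvWalk (PySem.List.sorted (PySem.Set.ofList (xs.filterMap pvOctet)) (fun x => x) false) 2 with hrdef
  have hi_oct : i ∉ xs.filterMap pvOctet := by
    intro hmm
    rw [List.mem_filterMap] at hmm
    obtain ⟨ip, hip, hpe⟩ := hmm
    exact hi_free ip hip hpe
  have hi_range : 2 ≤ i ∧ i < 255 := PySem.List.mem_pyRange_one.mp hi_mem
  have hri : r ≤ i := by
    by_contra h
    exact hi_oct ((hmemS i).mp (hrmin i hi_range.1 (by omega)))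
  have hr254 : r ≤ 254 := by omega
  have hB : next_peer_ip_py_alt xs =
      if r ≤ 254 then "10.13.13." ++ PySem.Int.toStr r ++ "/32" else "" := rfl
  have hrnot' : r ∉ xs.filterMap pvOctet := fun h => hrnot ((hmemS r).mpr h)
  have hfold : xs.foldl pvStepA PySem.Set.empty = PySem.Set.ofList (xs.filterMap pvOctet) := by
    rw [pvFoldA_eq]
    exact PySem.Set.update_empty _
  have hA : (PySem.List.pyRange 2 255 1).find?
      (fun j => !(PySem.Set.contains (xs.foldl pvStepA PySem.Set.empty) j)) = some r := by
    apply pvFind_pyRange _ 255 r _ (by omega) (r - 2).toNat 2 rfl hr2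
    · intro k hk1 hk2
      have hk : k ∈ xs.filterMap pvOctet := (hmemS k).mp (hrmin k hk1 hk2)
      simp only [hfold, Bool.not_eq_false']
      rw [PySem.Set.contains_iff, PySem.Set.mem_ofList]
      exact hk
    · simp only [hfold, Bool.not_eq_true']
      rw [← Bool.not_eq_true, PySem.Set.contains_iff, PySem.Set.mem_ofList]
      exact hrnot'
  have hAval : next_peer_ip_py xs = "10.13.13." ++ PySem.Int.toStr r ++ "/32" := by
    unfold next_peer_ip_py
    show (match (PySem.List.pyRange 2 255 1).find?
        (fun j => !(PySem.Set.contains (xs.foldl pvStepA PySem.Set.empty) j)) with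
      | some i => "10.13.13." ++ PySem.Int.toStr i ++ "/32"
      | none => "") = _
    rw [hA]
  rw [hAval, hB, if_pos hr254]
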